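-- pv_equiv track=rewrite | github.com/ZeNGrooT147/Vtu_python | vtu_pdf_parser.py | detect_branch_from_subjects
-- ===== SOURCE A (Python) =====
-- def detect_branch_from_subjects(subjects):
--     """Auto-detect branch from extracted subjects"""
--     if not subjects:
--         return "Unknown"
--
--     # Count branch-specific course codes
--     branch_counts = {
--         'CS': 0,  # Computer Science
--         'EC': 0,  # Electronics & Communication
--         'ME': 0,  # Mechanical Engineering
--         'CV': 0,  # Civil Engineering
--         'EE': 0,  # Electrical & Electronics
--         'IS': 0,  # Information Science
--         'AD': 0,  # AI & Data Science
--         'BT': 0,  # Biotechnology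
--         'CH': 0   # Chemical Engineering
--     }
--
--     for code in subjects.keys():
--         code_upper = code.upper()
--
--         # 2022 scheme patterns
--         if code_upper.startswith('BCS'): branch_counts['CS'] += 1
--         elif code_upper.startswith('BEC'): branch_counts['EC'] += 1
--         elif code_upper.startswith('BME'): branch_counts['ME'] += 1
--         elif code_upper.startswith('BCV'): branch_counts['CV'] += 1
--         elif code_upper.startswith('BEE'): branch_counts['EE'] += 1
--         elif code_upper.startswith('BIS'): branch_counts['IS'] += 1
--         elif code_upper.startswith('BAD'): branch_counts['AD'] += 1
--         elif code_upper.startswith('BBT'): branch_counts['BT'] += 1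
--         elif code_upper.startswith('BCH'): branch_counts['CH'] += 1
--
--         # 2021 scheme patterns
--         elif code_upper.startswith('21CS'): branch_counts['CS'] += 1
--         elif code_upper.startswith('21EC'): branch_counts['EC'] += 1
--         elif code_upper.startswith('21ME'): branch_counts['ME'] += 1
--         elif code_upper.startswith('21CV'): branch_counts['CV'] += 1
--         elif code_upper.startswith('21EE'): branch_counts['EE'] += 1
--         elif code_upper.startswith('21IS'): branch_counts['IS'] += 1
--         elif code_upper.startswith('21AD'): branch_counts['AD'] += 1
--         elif code_upper.startswith('21BT'): branch_counts['BT'] += 1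
--         elif code_upper.startswith('21CH'): branch_counts['CH'] += 1
--
--         # 2018 scheme patterns
--         elif code_upper.startswith('18CS'): branch_counts['CS'] += 1
--         elif code_upper.startswith('18EC'): branch_counts['EC'] += 1
--         elif code_upper.startswith('18ME'): branch_counts['ME'] += 1
--         elif code_upper.startswith('18CV'): branch_counts['CV'] += 1
--         elif code_upper.startswith('18EE'): branch_counts['EE'] += 1
--         elif code_upper.startswith('18IS'): branch_counts['IS'] += 1
--         elif code_upper.startswith('18AD'): branch_counts['AD'] += 1
--         elif code_upper.startswith('18BT'): branch_counts['BT'] += 1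
--         elif code_upper.startswith('18CH'): branch_counts['CH'] += 1
--
--         # 2017 scheme patterns
--         elif code_upper.startswith('17CS'): branch_counts['CS'] += 1
--         elif code_upper.startswith('17EC'): branch_counts['EC'] += 1
--         elif code_upper.startswith('17ME'): branch_counts['ME'] += 1
--         elif code_upper.startswith('17CV'): branch_counts['CV'] += 1
--         elif code_upper.startswith('17EE'): branch_counts['EE'] += 1
--         elif code_upper.startswith('17IS'): branch_counts['IS'] += 1
--         elif code_upper.startswith('17AD'): branch_counts['AD'] += 1
--         elif code_upper.startswith('17BT'): branch_counts['BT'] += 1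
--         elif code_upper.startswith('17CH'): branch_counts['CH'] += 1
--
--         # 2015 scheme patterns
--         elif code_upper.startswith('15CS'): branch_counts['CS'] += 1
--         elif code_upper.startswith('15EC'): branch_counts['EC'] += 1
--         elif code_upper.startswith('15ME'): branch_counts['ME'] += 1
--         elif code_upper.startswith('15CV'): branch_counts['CV'] += 1
--         elif code_upper.startswith('15EE'): branch_counts['EE'] += 1
--         elif code_upper.startswith('15IS'): branch_counts['IS'] += 1
--         elif code_upper.startswith('15AD'): branch_counts['AD'] += 1
--         elif code_upper.startswith('15BT'): branch_counts['BT'] += 1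
--         elif code_upper.startswith('15CH'): branch_counts['CH'] += 1
--
--     # Return the branch with the highest count
--     if branch_counts:
--         best_branch = max(branch_counts, key=branch_counts.get)
--         if branch_counts[best_branch] > 0:
--             return best_branch
--
--     return "Unknown"
-- ===== SOURCE B (Python) =====
-- _BRANCHES = ('CS', 'EC', 'ME', 'CV', 'EE', 'IS', 'AD', 'BT', 'CH')
-- _YEARS = ('15', '17', '18', '21')
--
--
-- def detect_branch_from_subjects(subjects):
--     """Auto-detect branch from extracted subjects"""
--     if not subjects:
--         return "Unknown"
--
--     counts = dict.fromkeys(_BRANCHES, 0)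
--
--     for code in subjects:
--         cu = code.upper()
--         if cu.startswith('B'):
--             key = cu[1:3]
--         elif cu[:2] in _YEARS:
--             key = cu[2:4]
--         else:
--             continue
--         if key in counts:
--             counts[key] += 1
--
--     best = max(counts, key=counts.get)
--     return best if counts[best] > 0 else "Unknown"
-- ===== Notes on version B (the rewrite author's own statement) =====
-- stated objective: faster
-- what changed: B replaces A's 45-branch elif chain (one startswith test per scheme-year x branch combination) by a single classification step per code - scheme prefix ('B' or a two-digit year in {15,17,18,21}) selects the two-letter key slice, which is then counted if it is one of the nine branch codes - keeping the same dict order so max() tie-breaks identically.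
import Mathlib
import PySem

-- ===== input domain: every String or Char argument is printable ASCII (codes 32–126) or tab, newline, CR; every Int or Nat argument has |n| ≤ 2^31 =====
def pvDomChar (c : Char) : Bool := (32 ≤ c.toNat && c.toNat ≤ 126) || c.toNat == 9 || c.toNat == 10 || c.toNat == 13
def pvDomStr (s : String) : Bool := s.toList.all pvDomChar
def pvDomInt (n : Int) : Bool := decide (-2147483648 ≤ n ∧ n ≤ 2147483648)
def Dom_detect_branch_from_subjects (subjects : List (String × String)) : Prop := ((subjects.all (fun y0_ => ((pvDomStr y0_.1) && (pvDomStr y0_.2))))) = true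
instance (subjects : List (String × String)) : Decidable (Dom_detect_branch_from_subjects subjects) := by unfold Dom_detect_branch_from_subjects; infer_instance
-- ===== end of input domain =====

-- B re-decomposes A's 45-branch elif chain: classify each code once (scheme prefix -> two-letter key),
-- then count keys found in the nine-entry branch table; same counts, same dict order, same result.

-- ===== PORT A =====
-- helper: the body of A's per-code elif chain (cu = code.upper())
def pvClassifyA (cu : String) (d : PySem.Dict String Int) : PySem.Dict String Int :=
  if PySem.Str.startswith cu "BCS" then d.modify "CS" 0 (· + 1)
  else if PySem.Str.startswith cu "BEC" then d.modify "EC" 0 (· + 1)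
  else if PySem.Str.startswith cu "BME" then d.modify "ME" 0 (· + 1)
  else if PySem.Str.startswith cu "BCV" then d.modify "CV" 0 (· + 1)
  else if PySem.Str.startswith cu "BEE" then d.modify "EE" 0 (· + 1)
  else if PySem.Str.startswith cu "BIS" then d.modify "IS" 0 (· + 1)
  else if PySem.Str.startswith cu "BAD" then d.modify "AD" 0 (· + 1)
  else if PySem.Str.startswith cu "BBT" then d.modify "BT" 0 (· + 1)
  else if PySem.Str.startswith cu "BCH" then d.modify "CH" 0 (· + 1)
  else if PySem.Str.startswith cu "21CS" then d.modify "CS" 0 (· + 1)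
  else if PySem.Str.startswith cu "21EC" then d.modify "EC" 0 (· + 1)
  else if PySem.Str.startswith cu "21ME" then d.modify "ME" 0 (· + 1)
  else if PySem.Str.startswith cu "21CV" then d.modify "CV" 0 (· + 1)
  else if PySem.Str.startswith cu "21EE" then d.modify "EE" 0 (· + 1)
  else if PySem.Str.startswith cu "21IS" then d.modify "IS" 0 (· + 1)
  else if PySem.Str.startswith cu "21AD" then d.modify "AD" 0 (· + 1)
  else if PySem.Str.startswith cu "21BT" then d.modify "BT" 0 (· + 1)
  else if PySem.Str.startswith cu "21CH" then d.modify "CH" 0 (· + 1)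
  else if PySem.Str.startswith cu "18CS" then d.modify "CS" 0 (· + 1)
  else if PySem.Str.startswith cu "18EC" then d.modify "EC" 0 (· + 1)
  else if PySem.Str.startswith cu "18ME" then d.modify "ME" 0 (· + 1)
  else if PySem.Str.startswith cu "18CV" then d.modify "CV" 0 (· + 1)
  else if PySem.Str.startswith cu "18EE" then d.modify "EE" 0 (· + 1)
  else if PySem.Str.startswith cu "18IS" then d.modify "IS" 0 (· + 1)
  else if PySem.Str.startswith cu "18AD" then d.modify "AD" 0 (· + 1)
  else if PySem.Str.startswith cu "18BT" then d.modify "BT" 0 (· + 1)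
  else if PySem.Str.startswith cu "18CH" then d.modify "CH" 0 (· + 1)
  else if PySem.Str.startswith cu "17CS" then d.modify "CS" 0 (· + 1)
  else if PySem.Str.startswith cu "17EC" then d.modify "EC" 0 (· + 1)
  else if PySem.Str.startswith cu "17ME" then d.modify "ME" 0 (· + 1)
  else if PySem.Str.startswith cu "17CV" then d.modify "CV" 0 (· + 1)
  else if PySem.Str.startswith cu "17EE" then d.modify "EE" 0 (· + 1)
  else if PySem.Str.startswith cu "17IS" then d.modify "IS" 0 (· + 1)
  else if PySem.Str.startswith cu "17AD" then d.modify "AD" 0 (· + 1)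
  else if PySem.Str.startswith cu "17BT" then d.modify "BT" 0 (· + 1)
  else if PySem.Str.startswith cu "17CH" then d.modify "CH" 0 (· + 1)
  else if PySem.Str.startswith cu "15CS" then d.modify "CS" 0 (· + 1)
  else if PySem.Str.startswith cu "15EC" then d.modify "EC" 0 (· + 1)
  else if PySem.Str.startswith cu "15ME" then d.modify "ME" 0 (· + 1)
  else if PySem.Str.startswith cu "15CV" then d.modify "CV" 0 (· + 1)
  else if PySem.Str.startswith cu "15EE" then d.modify "EE" 0 (· + 1)
  else if PySem.Str.startswith cu "15IS" then d.modify "IS" 0 (· + 1)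
  else if PySem.Str.startswith cu "15AD" then d.modify "AD" 0 (· + 1)
  else if PySem.Str.startswith cu "15BT" then d.modify "BT" 0 (· + 1)
  else if PySem.Str.startswith cu "15CH" then d.modify "CH" 0 (· + 1)
  else d

def pvStepA (d : PySem.Dict String Int) (code : String) : PySem.Dict String Int :=
  pvClassifyA (PySem.Str.upper code) d

def detect_branch_from_subjects (subjects : List (String × String)) : String :=
  if subjects = [] then "Unknown"
  else
    let d0 : PySem.Dict String Int :=
      PySem.Dict.ofList [("CS",0),("EC",0),("ME",0),("CV",0),("EE",0),("IS",0),("AD",0),("BT",0),("CH",0)]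
    let d := ((PySem.Dict.mk subjects).keys).foldl pvStepA d0
    if d.size ≠ 0 then
      match PySem.List.max? d.keys (fun k => d.getD k 0) with
      | some best => if d.getD best 0 > 0 then best else "Unknown"  -- branch_counts[best] exact: best ∈ keys (max?_mem)
      | none => "Unknown"
    else "Unknown"

-- ===== PORT B =====
def pvBranches : List String := ["CS", "EC", "ME", "CV", "EE", "IS", "AD", "BT", "CH"]

def pvYears : List String := ["15", "17", "18", "21"]

-- helper: scheme-prefix classification of one (already uppercased) code
def pvKeyB (cu : String) : Option String :=
  if PySem.Str.startswith cu "B" then some (PySem.Str.slice cu (some 1) (some 3))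
  else if pvYears.contains (PySem.Str.slice cu none (some 2)) then some (PySem.Str.slice cu (some 2) (some 4))
  else none

def pvStepB (d : PySem.Dict String Int) (code : String) : PySem.Dict String Int :=
  match pvKeyB (PySem.Str.upper code) with
  | some key => if d.contains key then d.modify key 0 (· + 1) else d
  | none => d

def detect_branch_from_subjects_alt (subjects : List (String × String)) : String :=
  if subjects = [] then "Unknown"
  else
    let d := ((PySem.Dict.mk subjects).keys).foldl pvStepB
      (PySem.Dict.ofList (pvBranches.map (fun b => (b, (0 : Int)))))
    match PySem.List.max? d.keys (fun k => d.getD k 0) with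
    | some best => if d.getD best 0 > 0 then best else "Unknown"  -- counts[best] exact: best ∈ keys (max?_mem)
    | none => "Unknown"

-- ===== PRECONDITION & SPEC =====
def Spec_detect_branch_from_subjects (subjects : List (String × String)) (out : String) : Prop := out = detect_branch_from_subjects_alt subjects
instance (subjects : List (String × String)) (out : String) : Decidable (Spec_detect_branch_from_subjects subjects out) := by unfold Spec_detect_branch_from_subjects; infer_instance

-- ===== CLAIM (what is proved, stated in full; the proofs are below) =====
def Claim_equal_detect_branch_from_subjects : Prop := ∀ (subjects : List (String × String)), Dom_detect_branch_from_subjects subjects → Spec_detect_branch_from_subjects subjects (detect_branch_from_subjects subjects)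


-- ===== LEMMAS AND PROOFS =====
-- proof-side: A's chain as a pure classifier
def pvKeyA (cu : String) : Option String :=
  if PySem.Str.startswith cu "BCS" then some "CS"
  else if PySem.Str.startswith cu "BEC" then some "EC"
  else if PySem.Str.startswith cu "BME" then some "ME"
  else if PySem.Str.startswith cu "BCV" then some "CV"
  else if PySem.Str.startswith cu "BEE" then some "EE"
  else if PySem.Str.startswith cu "BIS" then some "IS"
  else if PySem.Str.startswith cu "BAD" then some "AD"
  else if PySem.Str.startswith cu "BBT" then some "BT"
  else if PySem.Str.startswith cu "BCH" then some "CH"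
  else if PySem.Str.startswith cu "21CS" then some "CS"
  else if PySem.Str.startswith cu "21EC" then some "EC"
  else if PySem.Str.startswith cu "21ME" then some "ME"
  else if PySem.Str.startswith cu "21CV" then some "CV"
  else if PySem.Str.startswith cu "21EE" then some "EE"
  else if PySem.Str.startswith cu "21IS" then some "IS"
  else if PySem.Str.startswith cu "21AD" then some "AD"
  else if PySem.Str.startswith cu "21BT" then some "BT"
  else if PySem.Str.startswith cu "21CH" then some "CH"
  else if PySem.Str.startswith cu "18CS" then some "CS"
  else if PySem.Str.startswith cu "18EC" then some "EC"
  else if PySem.Str.startswith cu "18ME" then some "ME"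
  else if PySem.Str.startswith cu "18CV" then some "CV"
  else if PySem.Str.startswith cu "18EE" then some "EE"
  else if PySem.Str.startswith cu "18IS" then some "IS"
  else if PySem.Str.startswith cu "18AD" then some "AD"
  else if PySem.Str.startswith cu "18BT" then some "BT"
  else if PySem.Str.startswith cu "18CH" then some "CH"
  else if PySem.Str.startswith cu "17CS" then some "CS"
  else if PySem.Str.startswith cu "17EC" then some "EC"
  else if PySem.Str.startswith cu "17ME" then some "ME"
  else if PySem.Str.startswith cu "17CV" then some "CV"
  else if PySem.Str.startswith cu "17EE" then some "EE"
  else if PySem.Str.startswith cu "17IS" then some "IS"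
  else if PySem.Str.startswith cu "17AD" then some "AD"
  else if PySem.Str.startswith cu "17BT" then some "BT"
  else if PySem.Str.startswith cu "17CH" then some "CH"
  else if PySem.Str.startswith cu "15CS" then some "CS"
  else if PySem.Str.startswith cu "15EC" then some "EC"
  else if PySem.Str.startswith cu "15ME" then some "ME"
  else if PySem.Str.startswith cu "15CV" then some "CV"
  else if PySem.Str.startswith cu "15EE" then some "EE"
  else if PySem.Str.startswith cu "15IS" then some "IS"
  else if PySem.Str.startswith cu "15AD" then some "AD"
  else if PySem.Str.startswith cu "15BT" then some "BT"
  else if PySem.Str.startswith cu "15CH" then some "CH"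
  else none

-- proof-side: B's effective classifier once the table is known to hold exactly the nine branch keys
def pvKeyB' (cu : String) : Option String :=
  match pvKeyB cu with
  | some k => if k ∈ pvBranches then some k else none
  | none => none

set_option maxHeartbeats 2000000 in
lemma classifyA_eq_keyA (cu : String) (d : PySem.Dict String Int) :
    pvClassifyA cu d = (match pvKeyA cu with
      | some k => d.modify k 0 (· + 1)
      | none => d) := by
  unfold pvClassifyA pvKeyA
  by_cases h1 : PySem.Str.startswith cu "BCS" = true
  · rw [if_pos h1, if_pos h1]
  rw [if_neg h1, if_neg h1]
  by_cases h2 : PySem.Str.startswith cu "BEC" = true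
  · rw [if_pos h2, if_pos h2]
  rw [if_neg h2, if_neg h2]
  by_cases h3 : PySem.Str.startswith cu "BME" = true
  · rw [if_pos h3, if_pos h3]
  rw [if_neg h3, if_neg h3]
  by_cases h4 : PySem.Str.startswith cu "BCV" = true
  · rw [if_pos h4, if_pos h4]
  rw [if_neg h4, if_neg h4]
  by_cases h5 : PySem.Str.startswith cu "BEE" = true
  · rw [if_pos h5, if_pos h5]
  rw [if_neg h5, if_neg h5]
  by_cases h6 : PySem.Str.startswith cu "BIS" = true
  · rw [if_pos h6, if_pos h6]
  rw [if_neg h6, if_neg h6]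
  by_cases h7 : PySem.Str.startswith cu "BAD" = true
  · rw [if_pos h7, if_pos h7]
  rw [if_neg h7, if_neg h7]
  by_cases h8 : PySem.Str.startswith cu "BBT" = true
  · rw [if_pos h8, if_pos h8]
  rw [if_neg h8, if_neg h8]
  by_cases h9 : PySem.Str.startswith cu "BCH" = true
  · rw [if_pos h9, if_pos h9]
  rw [if_neg h9, if_neg h9]
  by_cases h10 : PySem.Str.startswith cu "21CS" = true
  · rw [if_pos h10, if_pos h10]
  rw [if_neg h10, if_neg h10]
  by_cases h11 : PySem.Str.startswith cu "21EC" = true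
  · rw [if_pos h11, if_pos h11]
  rw [if_neg h11, if_neg h11]
  by_cases h12 : PySem.Str.startswith cu "21ME" = true
  · rw [if_pos h12, if_pos h12]
  rw [if_neg h12, if_neg h12]
  by_cases h13 : PySem.Str.startswith cu "21CV" = true
  · rw [if_pos h13, if_pos h13]
  rw [if_neg h13, if_neg h13]
  by_cases h14 : PySem.Str.startswith cu "21EE" = true
  · rw [if_pos h14, if_pos h14]
  rw [if_neg h14, if_neg h14]
  by_cases h15 : PySem.Str.startswith cu "21IS" = true
  · rw [if_pos h15, if_pos h15]
  rw [if_neg h15, if_neg h15]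
  by_cases h16 : PySem.Str.startswith cu "21AD" = true
  · rw [if_pos h16, if_pos h16]
  rw [if_neg h16, if_neg h16]
  by_cases h17 : PySem.Str.startswith cu "21BT" = true
  · rw [if_pos h17, if_pos h17]
  rw [if_neg h17, if_neg h17]
  by_cases h18 : PySem.Str.startswith cu "21CH" = true
  · rw [if_pos h18, if_pos h18]
  rw [if_neg h18, if_neg h18]
  by_cases h19 : PySem.Str.startswith cu "18CS" = true
  · rw [if_pos h19, if_pos h19]
  rw [if_neg h19, if_neg h19]
  by_cases h20 : PySem.Str.startswith cu "18EC" = true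
  · rw [if_pos h20, if_pos h20]
  rw [if_neg h20, if_neg h20]
  by_cases h21 : PySem.Str.startswith cu "18ME" = true
  · rw [if_pos h21, if_pos h21]
  rw [if_neg h21, if_neg h21]
  by_cases h22 : PySem.Str.startswith cu "18CV" = true
  · rw [if_pos h22, if_pos h22]
  rw [if_neg h22, if_neg h22]
  by_cases h23 : PySem.Str.startswith cu "18EE" = true
  · rw [if_pos h23, if_pos h23]
  rw [if_neg h23, if_neg h23]
  by_cases h24 : PySem.Str.startswith cu "18IS" = true
  · rw [if_pos h24, if_pos h24]
  rw [if_neg h24, if_neg h24]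
  by_cases h25 : PySem.Str.startswith cu "18AD" = true
  · rw [if_pos h25, if_pos h25]
  rw [if_neg h25, if_neg h25]
  by_cases h26 : PySem.Str.startswith cu "18BT" = true
  · rw [if_pos h26, if_pos h26]
  rw [if_neg h26, if_neg h26]
  by_cases h27 : PySem.Str.startswith cu "18CH" = true
  · rw [if_pos h27, if_pos h27]
  rw [if_neg h27, if_neg h27]
  by_cases h28 : PySem.Str.startswith cu "17CS" = true
  · rw [if_pos h28, if_pos h28]
  rw [if_neg h28, if_neg h28]
  by_cases h29 : PySem.Str.startswith cu "17EC" = true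
  · rw [if_pos h29, if_pos h29]
  rw [if_neg h29, if_neg h29]
  by_cases h30 : PySem.Str.startswith cu "17ME" = true
  · rw [if_pos h30, if_pos h30]
  rw [if_neg h30, if_neg h30]
  by_cases h31 : PySem.Str.startswith cu "17CV" = true
  · rw [if_pos h31, if_pos h31]
  rw [if_neg h31, if_neg h31]
  by_cases h32 : PySem.Str.startswith cu "17EE" = true
  · rw [if_pos h32, if_pos h32]
  rw [if_neg h32, if_neg h32]
  by_cases h33 : PySem.Str.startswith cu "17IS" = true
  · rw [if_pos h33, if_pos h33]
  rw [if_neg h33, if_neg h33]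
  by_cases h34 : PySem.Str.startswith cu "17AD" = true
  · rw [if_pos h34, if_pos h34]
  rw [if_neg h34, if_neg h34]
  by_cases h35 : PySem.Str.startswith cu "17BT" = true
  · rw [if_pos h35, if_pos h35]
  rw [if_neg h35, if_neg h35]
  by_cases h36 : PySem.Str.startswith cu "17CH" = true
  · rw [if_pos h36, if_pos h36]
  rw [if_neg h36, if_neg h36]
  by_cases h37 : PySem.Str.startswith cu "15CS" = true
  · rw [if_pos h37, if_pos h37]
  rw [if_neg h37, if_neg h37]
  by_cases h38 : PySem.Str.startswith cu "15EC" = true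
  · rw [if_pos h38, if_pos h38]
  rw [if_neg h38, if_neg h38]
  by_cases h39 : PySem.Str.startswith cu "15ME" = true
  · rw [if_pos h39, if_pos h39]
  rw [if_neg h39, if_neg h39]
  by_cases h40 : PySem.Str.startswith cu "15CV" = true
  · rw [if_pos h40, if_pos h40]
  rw [if_neg h40, if_neg h40]
  by_cases h41 : PySem.Str.startswith cu "15EE" = true
  · rw [if_pos h41, if_pos h41]
  rw [if_neg h41, if_neg h41]
  by_cases h42 : PySem.Str.startswith cu "15IS" = true
  · rw [if_pos h42, if_pos h42]
  rw [if_neg h42, if_neg h42]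
  by_cases h43 : PySem.Str.startswith cu "15AD" = true
  · rw [if_pos h43, if_pos h43]
  rw [if_neg h43, if_neg h43]
  by_cases h44 : PySem.Str.startswith cu "15BT" = true
  · rw [if_pos h44, if_pos h44]
  rw [if_neg h44, if_neg h44]
  by_cases h45 : PySem.Str.startswith cu "15CH" = true
  · rw [if_pos h45, if_pos h45]
  rw [if_neg h45, if_neg h45]

lemma ofList_eq_lit (l : List Char) (s : String) : (String.ofList l = s) ↔ l = s.toList := by
  constructor
  · intro h; rw [← h, String.toList_ofList]
  · intro h; rw [h, String.ofList_toList]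

lemma pair9 (x y : Char) :
    (if 'C' = x ∧ 'S' = y then some "CS"
     else if 'E' = x ∧ 'C' = y then some "EC"
     else if 'M' = x ∧ 'E' = y then some "ME"
     else if 'C' = x ∧ 'V' = y then some "CV"
     else if 'E' = x ∧ 'E' = y then some "EE"
     else if 'I' = x ∧ 'S' = y then some "IS"
     else if 'A' = x ∧ 'D' = y then some "AD"
     else if 'B' = x ∧ 'T' = y then some "BT"
     else if 'C' = x ∧ 'H' = y then some "CH"
     else none)
    = (if String.ofList [x, y] ∈ pvBranches then some (String.ofList [x, y]) else none) := by
  by_cases h1 : 'C' = x ∧ 'S' = y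
  · obtain ⟨rfl, rfl⟩ := h1
    decide
  rw [if_neg h1]
  by_cases h2 : 'E' = x ∧ 'C' = y
  · obtain ⟨rfl, rfl⟩ := h2
    decide
  rw [if_neg h2]
  by_cases h3 : 'M' = x ∧ 'E' = y
  · obtain ⟨rfl, rfl⟩ := h3
    decide
  rw [if_neg h3]
  by_cases h4 : 'C' = x ∧ 'V' = y
  · obtain ⟨rfl, rfl⟩ := h4
    decide
  rw [if_neg h4]
  by_cases h5 : 'E' = x ∧ 'E' = y
  · obtain ⟨rfl, rfl⟩ := h5
    decide
  rw [if_neg h5]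
  by_cases h6 : 'I' = x ∧ 'S' = y
  · obtain ⟨rfl, rfl⟩ := h6
    decide
  rw [if_neg h6]
  by_cases h7 : 'A' = x ∧ 'D' = y
  · obtain ⟨rfl, rfl⟩ := h7
    decide
  rw [if_neg h7]
  by_cases h8 : 'B' = x ∧ 'T' = y
  · obtain ⟨rfl, rfl⟩ := h8
    decide
  rw [if_neg h8]
  by_cases h9 : 'C' = x ∧ 'H' = y
  · obtain ⟨rfl, rfl⟩ := h9
    decide
  rw [if_neg h9]
  rw [if_neg]
  intro hm
  simp only [pvBranches, List.mem_cons, List.not_mem_nil, or_false, ofList_eq_lit] at hm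
  simp at hm
  rcases hm with (⟨rfl,rfl⟩|⟨rfl,rfl⟩|⟨rfl,rfl⟩|⟨rfl,rfl⟩|⟨rfl,rfl⟩|⟨rfl,rfl⟩|⟨rfl,rfl⟩|⟨rfl,rfl⟩|⟨rfl,rfl⟩)
  · exact h1 ⟨rfl, rfl⟩
  · exact h2 ⟨rfl, rfl⟩
  · exact h3 ⟨rfl, rfl⟩
  · exact h4 ⟨rfl, rfl⟩
  · exact h5 ⟨rfl, rfl⟩
  · exact h6 ⟨rfl, rfl⟩
  · exact h7 ⟨rfl, rfl⟩
  · exact h8 ⟨rfl, rfl⟩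
  · exact h9 ⟨rfl, rfl⟩

lemma slice_to2 (l : List Char) : PySem.List.slice l none (some 2) = l.take 2 := by
  rw [show (2:Int) = ((2:Nat):Int) from rfl, PySem.List.slice_to_natCast]

lemma slice13 (a : Char) (t : List Char) :
    PySem.List.slice (a::t) (some 1) (some 3) = t.take 2 := by
  rw [show (1:Int) = ((1:Nat):Int) from rfl, show (3:Int) = ((3:Nat):Int) from rfl,
    PySem.List.slice_natCast]
  rfl

lemma slice24 (a b : Char) (t : List Char) :
    PySem.List.slice (a::b::t) (some 2) (some 4) = t.take 2 := by
  rw [show (2:Int) = ((2:Nat):Int) from rfl, show (4:Int) = ((4:Nat):Int) from rfl,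
    PySem.List.slice_natCast]
  rfl

set_option maxHeartbeats 1000000 in
lemma shape4_B (c2 c3 c4 : Char) (r : List Char) :
    pvKeyA (String.ofList ('B'::c2::c3::c4::r)) = pvKeyB' (String.ofList ('B'::c2::c3::c4::r)) := by
  simp only [pvKeyA, pvKeyB', pvKeyB, pvYears, PySem.Str.startswith, PySem.Str.slice,
    PySem.Chars.startswith, PySem.Chars.slice, String.toList_ofList, String.reduceToList,
    List.isPrefixOf_cons₂, List.isPrefixOf_nil_left, List.isPrefixOf_cons_nil,
    beq_iff_eq, Bool.and_eq_true, Char.reduceEq, List.contains_cons, List.contains_nil,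
    Bool.or_eq_true, Bool.or_false, or_false, false_or, ofList_eq_lit, List.cons.injEq, reduceCtorEq,
    Bool.false_eq_true, ite_self, or_self,
    slice_to2, slice13, slice24, List.take_succ_cons, List.take_zero, List.take_nil,
    if_true, if_false, true_and, false_and, and_false, and_true, ite_true, ite_false]
  exact pair9 c2 c3

set_option maxHeartbeats 1000000 in
lemma shape4_15 (c3 c4 : Char) (r : List Char) :
    pvKeyA (String.ofList ('1'::'5'::c3::c4::r)) = pvKeyB' (String.ofList ('1'::'5'::c3::c4::r)) := by
  simp only [pvKeyA, pvKeyB', pvKeyB, pvYears, PySem.Str.startswith, PySem.Str.slice,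
    PySem.Chars.startswith, PySem.Chars.slice, String.toList_ofList, String.reduceToList,
    List.isPrefixOf_cons₂, List.isPrefixOf_nil_left, List.isPrefixOf_cons_nil,
    beq_iff_eq, Bool.and_eq_true, Char.reduceEq, List.contains_cons, List.contains_nil,
    Bool.or_eq_true, Bool.or_false, or_false, false_or, ofList_eq_lit, List.cons.injEq, reduceCtorEq,
    Bool.false_eq_true, ite_self, or_self,
    slice_to2, slice13, slice24, List.take_succ_cons, List.take_zero, List.take_nil,
    if_true, if_false, true_and, false_and, and_false, and_true, ite_true, ite_false]
  exact pair9 c3 c4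

set_option maxHeartbeats 1000000 in
lemma shape4_17 (c3 c4 : Char) (r : List Char) :
    pvKeyA (String.ofList ('1'::'7'::c3::c4::r)) = pvKeyB' (String.ofList ('1'::'7'::c3::c4::r)) := by
  simp only [pvKeyA, pvKeyB', pvKeyB, pvYears, PySem.Str.startswith, PySem.Str.slice,
    PySem.Chars.startswith, PySem.Chars.slice, String.toList_ofList, String.reduceToList,
    List.isPrefixOf_cons₂, List.isPrefixOf_nil_left, List.isPrefixOf_cons_nil,
    beq_iff_eq, Bool.and_eq_true, Char.reduceEq, List.contains_cons, List.contains_nil,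
    Bool.or_eq_true, Bool.or_false, or_false, false_or, ofList_eq_lit, List.cons.injEq, reduceCtorEq,
    Bool.false_eq_true, ite_self, or_self,
    slice_to2, slice13, slice24, List.take_succ_cons, List.take_zero, List.take_nil,
    if_true, if_false, true_and, false_and, and_false, and_true, ite_true, ite_false]
  exact pair9 c3 c4

set_option maxHeartbeats 1000000 in
lemma shape4_18 (c3 c4 : Char) (r : List Char) :
    pvKeyA (String.ofList ('1'::'8'::c3::c4::r)) = pvKeyB' (String.ofList ('1'::'8'::c3::c4::r)) := by
  simp only [pvKeyA, pvKeyB', pvKeyB, pvYears, PySem.Str.startswith, PySem.Str.slice,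
    PySem.Chars.startswith, PySem.Chars.slice, String.toList_ofList, String.reduceToList,
    List.isPrefixOf_cons₂, List.isPrefixOf_nil_left, List.isPrefixOf_cons_nil,
    beq_iff_eq, Bool.and_eq_true, Char.reduceEq, List.contains_cons, List.contains_nil,
    Bool.or_eq_true, Bool.or_false, or_false, false_or, ofList_eq_lit, List.cons.injEq, reduceCtorEq,
    Bool.false_eq_true, ite_self, or_self,
    slice_to2, slice13, slice24, List.take_succ_cons, List.take_zero, List.take_nil,
    if_true, if_false, true_and, false_and, and_false, and_true, ite_true, ite_false]
  exact pair9 c3 c4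

set_option maxHeartbeats 1000000 in
lemma shape4_21 (c3 c4 : Char) (r : List Char) :
    pvKeyA (String.ofList ('2'::'1'::c3::c4::r)) = pvKeyB' (String.ofList ('2'::'1'::c3::c4::r)) := by
  simp only [pvKeyA, pvKeyB', pvKeyB, pvYears, PySem.Str.startswith, PySem.Str.slice,
    PySem.Chars.startswith, PySem.Chars.slice, String.toList_ofList, String.reduceToList,
    List.isPrefixOf_cons₂, List.isPrefixOf_nil_left, List.isPrefixOf_cons_nil,
    beq_iff_eq, Bool.and_eq_true, Char.reduceEq, List.contains_cons, List.contains_nil,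
    Bool.or_eq_true, Bool.or_false, or_false, false_or, ofList_eq_lit, List.cons.injEq, reduceCtorEq,
    Bool.false_eq_true, ite_self, or_self,
    slice_to2, slice13, slice24, List.take_succ_cons, List.take_zero, List.take_nil,
    if_true, if_false, true_and, false_and, and_false, and_true, ite_true, ite_false]
  exact pair9 c3 c4

set_option maxHeartbeats 1000000 in
lemma keyA_eq_keyB' (cu : String) : pvKeyA cu = pvKeyB' cu := by
  have hofl : String.ofList cu.toList = cu := String.ofList_toList
  rw [← hofl]
  generalize cu.toList = l
  match l with
  | [] => decide
  | [c1] =>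
    by_cases hB : 'B' = c1
    · obtain rfl := hB; decide
    · simp only [pvKeyA, pvKeyB', pvKeyB, pvYears, PySem.Str.startswith, PySem.Str.slice,
        PySem.Chars.startswith, PySem.Chars.slice, String.toList_ofList, String.reduceToList,
        List.isPrefixOf_cons₂, List.isPrefixOf_nil_left, List.isPrefixOf_cons_nil,
        beq_iff_eq, Bool.and_eq_true, Char.reduceEq, List.contains_cons, List.contains_nil,
        Bool.or_eq_true, Bool.or_false, or_false, false_or, ofList_eq_lit, List.cons.injEq,
        reduceCtorEq, Bool.false_eq_true, ite_self, or_self, slice_to2, slice13, slice24,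
        List.take_succ_cons, List.take_zero, List.take_nil, if_true, if_false, true_and,
        false_and, and_false, and_true, ite_true, hB]
      try simp [pvBranches, ofList_eq_lit]
  | [c1, c2] =>
    by_cases hB : 'B' = c1
    · obtain rfl := hB
      simp only [pvKeyA, pvKeyB', pvKeyB, pvYears, PySem.Str.startswith, PySem.Str.slice,
        PySem.Chars.startswith, PySem.Chars.slice, String.toList_ofList, String.reduceToList,
        List.isPrefixOf_cons₂, List.isPrefixOf_nil_left, List.isPrefixOf_cons_nil,
        beq_iff_eq, Bool.and_eq_true, Char.reduceEq, List.contains_cons, List.contains_nil,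
        Bool.or_eq_true, Bool.or_false, or_false, false_or, ofList_eq_lit, List.cons.injEq,
        reduceCtorEq, Bool.false_eq_true, ite_self, or_self, slice_to2, slice13, slice24,
        List.take_succ_cons, List.take_zero, List.take_nil, if_true, if_false, true_and,
        false_and, and_false, and_true, ite_true]
      try simp [pvBranches, ofList_eq_lit]
    · simp only [pvKeyA, pvKeyB', pvKeyB, pvYears, PySem.Str.startswith, PySem.Str.slice,
        PySem.Chars.startswith, PySem.Chars.slice, String.toList_ofList, String.reduceToList,
        List.isPrefixOf_cons₂, List.isPrefixOf_nil_left, List.isPrefixOf_cons_nil,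
        beq_iff_eq, Bool.and_eq_true, Char.reduceEq, List.contains_cons, List.contains_nil,
        Bool.or_eq_true, Bool.or_false, or_false, false_or, ofList_eq_lit, List.cons.injEq,
        reduceCtorEq, Bool.false_eq_true, ite_self, or_self, slice_to2, slice13, slice24,
        List.take_succ_cons, List.take_zero, List.take_nil, if_true, if_false, true_and,
        false_and, and_false, and_true, ite_true, hB]
      split_ifs <;> first | rfl | simp [pvBranches, ofList_eq_lit]
  | [c1, c2, c3] =>
    by_cases hB : 'B' = c1
    · obtain rfl := hB
      simp only [pvKeyA, pvKeyB', pvKeyB, pvYears, PySem.Str.startswith, PySem.Str.slice,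
        PySem.Chars.startswith, PySem.Chars.slice, String.toList_ofList, String.reduceToList,
        List.isPrefixOf_cons₂, List.isPrefixOf_nil_left, List.isPrefixOf_cons_nil,
        beq_iff_eq, Bool.and_eq_true, Char.reduceEq, List.contains_cons, List.contains_nil,
        Bool.or_eq_true, Bool.or_false, or_false, false_or, ofList_eq_lit, List.cons.injEq,
        reduceCtorEq, Bool.false_eq_true, ite_self, or_self, slice_to2, slice13, slice24,
        List.take_succ_cons, List.take_zero, List.take_nil, if_true, if_false, true_and,
        false_and, and_false, and_true, ite_true]
      exact pair9 c2 c3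
    · simp only [pvKeyA, pvKeyB', pvKeyB, pvYears, PySem.Str.startswith, PySem.Str.slice,
        PySem.Chars.startswith, PySem.Chars.slice, String.toList_ofList, String.reduceToList,
        List.isPrefixOf_cons₂, List.isPrefixOf_nil_left, List.isPrefixOf_cons_nil,
        beq_iff_eq, Bool.and_eq_true, Char.reduceEq, List.contains_cons, List.contains_nil,
        Bool.or_eq_true, Bool.or_false, or_false, false_or, ofList_eq_lit, List.cons.injEq,
        reduceCtorEq, Bool.false_eq_true, ite_self, or_self, slice_to2, slice13, slice24,
        List.take_succ_cons, List.take_zero, List.take_nil, if_true, if_false, true_and,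
        false_and, and_false, and_true, ite_true, hB]
      split_ifs <;> first | rfl | simp [pvBranches, ofList_eq_lit]
  | c1 :: c2 :: c3 :: c4 :: r =>
    by_cases hB : 'B' = c1
    · obtain rfl := hB; exact shape4_B c2 c3 c4 r
    by_cases h2 : '2' = c1
    · obtain rfl := h2
      by_cases h1 : '1' = c2
      · obtain rfl := h1; exact shape4_21 c3 c4 r
      · simp only [pvKeyA, pvKeyB', pvKeyB, pvYears, PySem.Str.startswith, PySem.Str.slice,
    PySem.Chars.startswith, PySem.Chars.slice, String.toList_ofList, String.reduceToList,
    List.isPrefixOf_cons₂, List.isPrefixOf_nil_left, List.isPrefixOf_cons_nil,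
    beq_iff_eq, Bool.and_eq_true, Char.reduceEq, List.contains_cons, List.contains_nil,
    Bool.or_eq_true, Bool.or_false, or_false, false_or, ofList_eq_lit, List.cons.injEq, reduceCtorEq,
    Bool.false_eq_true, ite_self, or_self,
    slice_to2, slice13, slice24, List.take_succ_cons, List.take_zero, List.take_nil,
    if_true, if_false, true_and, false_and, and_false, and_true, ite_true, ite_false, hB, h1, (Ne.symm h1 : ¬ (c2 = '1'))]
    by_cases h1 : '1' = c1
    · obtain rfl := h1
      by_cases h5 : '5' = c2
      · obtain rfl := h5; exact shape4_15 c3 c4 r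
      by_cases h7 : '7' = c2
      · obtain rfl := h7; exact shape4_17 c3 c4 r
      by_cases h8 : '8' = c2
      · obtain rfl := h8; exact shape4_18 c3 c4 r
      simp only [pvKeyA, pvKeyB', pvKeyB, pvYears, PySem.Str.startswith, PySem.Str.slice,
    PySem.Chars.startswith, PySem.Chars.slice, String.toList_ofList, String.reduceToList,
    List.isPrefixOf_cons₂, List.isPrefixOf_nil_left, List.isPrefixOf_cons_nil,
    beq_iff_eq, Bool.and_eq_true, Char.reduceEq, List.contains_cons, List.contains_nil,
    Bool.or_eq_true, Bool.or_false, or_false, false_or, ofList_eq_lit, List.cons.injEq, reduceCtorEq,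
    Bool.false_eq_true, ite_self, or_self,
    slice_to2, slice13, slice24, List.take_succ_cons, List.take_zero, List.take_nil,
    if_true, if_false, true_and, false_and, and_false, and_true, ite_true, ite_false, hB, h5, h7, h8, (Ne.symm h5 : ¬ (c2 = '5')),
        (Ne.symm h7 : ¬ (c2 = '7')), (Ne.symm h8 : ¬ (c2 = '8'))]
    simp only [pvKeyA, pvKeyB', pvKeyB, pvYears, PySem.Str.startswith, PySem.Str.slice,
    PySem.Chars.startswith, PySem.Chars.slice, String.toList_ofList, String.reduceToList,
    List.isPrefixOf_cons₂, List.isPrefixOf_nil_left, List.isPrefixOf_cons_nil,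
    beq_iff_eq, Bool.and_eq_true, Char.reduceEq, List.contains_cons, List.contains_nil,
    Bool.or_eq_true, Bool.or_false, or_false, false_or, ofList_eq_lit, List.cons.injEq, reduceCtorEq,
    Bool.false_eq_true, ite_self, or_self,
    slice_to2, slice13, slice24, List.take_succ_cons, List.take_zero, List.take_nil,
    if_true, if_false, true_and, false_and, and_false, and_true, ite_true, ite_false, hB, h2, h1, (Ne.symm h2 : ¬ (c1 = '2')), (Ne.symm h1 : ¬ (c1 = '1'))]

lemma stepB_keys (d : PySem.Dict String Int) (code : String) : (pvStepB d code).keys = d.keys := by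
  unfold pvStepB
  cases pvKeyB (PySem.Str.upper code) with
  | none => rfl
  | some k =>
    by_cases hc : d.contains k = true
    · simp only [hc, if_true, PySem.Dict.keys_modify,
        PySem.Dict.keys_insert_of_contains d _ hc]
    · simp [hc]

lemma foldB_keys (l : List String) (d : PySem.Dict String Int) :
    (l.foldl pvStepB d).keys = d.keys := by
  induction l generalizing d with
  | nil => rfl
  | cons c t ih => rw [List.foldl_cons, ih, stepB_keys]

lemma step_eq (d : PySem.Dict String Int) (hd : d.keys = pvBranches) (code : String) :
    pvStepA d code = pvStepB d code := by
  unfold pvStepA pvStepB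
  rw [classifyA_eq_keyA, keyA_eq_keyB']
  unfold pvKeyB'
  cases pvKeyB (PySem.Str.upper code) with
  | none => rfl
  | some k =>
    show (match (if k ∈ pvBranches then some k else none) with
      | some k => d.modify k 0 (· + 1)
      | none => d) = if d.contains k = true then d.modify k 0 (· + 1) else d
    rw [PySem.Dict.contains_eq_decide_mem_keys, hd]
    by_cases hk : k ∈ pvBranches <;> simp [hk]

lemma fold_eq (l : List String) (d : PySem.Dict String Int) (hd : d.keys = pvBranches) :
    l.foldl pvStepA d = l.foldl pvStepB d := by
  induction l generalizing d with
  | nil => rfl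
  | cons c t ih =>
    rw [List.foldl_cons, List.foldl_cons, step_eq d hd c, ih _ (by rw [stepB_keys, hd])]

-- ===== VERDICT (by name: the statement is the Claim_ definition above) =====
theorem detect_branch_from_subjects_spec : Claim_equal_detect_branch_from_subjects := by
  intro subjects _
  unfold Spec_detect_branch_from_subjects detect_branch_from_subjects detect_branch_from_subjects_alt
  by_cases h : subjects = []
  · rw [if_pos h, if_pos h]
  · rw [if_neg h, if_neg h]
    dsimp only
    have hd0 : PySem.Dict.ofList (pvBranches.map (fun b => (b, (0 : Int)))) =
        PySem.Dict.ofList [("CS",0),("EC",0),("ME",0),("CV",0),("EE",0),("IS",0),("AD",0),("BT",0),("CH",0)] := rfl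
    rw [hd0, fold_eq _ _ (by rfl)]
    have hk : ((PySem.Dict.mk subjects).keys.foldl pvStepB
        (PySem.Dict.ofList [("CS",0),("EC",0),("ME",0),("CV",0),("EE",0),("IS",0),("AD",0),("BT",0),("CH",0)])).keys
        = pvBranches := by
      rw [foldB_keys]; rfl
    have hsz : ((PySem.Dict.mk subjects).keys.foldl pvStepB
        (PySem.Dict.ofList [("CS",0),("EC",0),("ME",0),("CV",0),("EE",0),("IS",0),("AD",0),("BT",0),("CH",0)])).size ≠ 0 := by
      have hlen : ∀ d : PySem.Dict String Int, d.keys.length = d.size := by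
        intro d; simp [PySem.Dict.keys, PySem.Dict.size]
      rw [← hlen, hk]
      decide
    rw [if_pos hsz]
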